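-- pv_equiv track=rewrite | github.com/IsThatYou/Competitive-Programming | Project Euler/#169.py | f
-- ===== SOURCE A (Python) =====
-- memo = {}
--
-- def f(x):
--     if x in memo:
--     	return memo[x]
--     if (x == 0):
--     	return 1
--     ans = 0;
--     if x % 2 == 1:
--         ans = f(x // 2)
--     else:
--         ans = f(x // 2) + f(x//2 - 1)
--     memo[x] = ans
--     return ans
-- ===== SOURCE B (Python) =====
-- def f(x):
--     # Bottom-up Stern diatomic (fusc) computation: f(x) = fusc(x+1),
--     # maintained as a pair of accumulators while consuming x+1's bits LSB-first.
--     a, b = 1, 0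
--     n = x + 1
--     while n > 0:
--         if n % 2 == 1:
--             b = a + b
--         else:
--             a = a + b
--         n //= 2
--     return b
-- ===== Notes on version B (the rewrite author's own statement) =====
-- stated objective: faster
-- what changed: Replaces A's memoised top-down recursion (module-level dict, two recursive calls in the even branch) by a bottom-up iterative computation of Stern's diatomic value fusc(x+1): a single while-loop over the bits of x+1 maintaining two integer accumulators, no dict and no recursion.
import Mathlib
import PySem

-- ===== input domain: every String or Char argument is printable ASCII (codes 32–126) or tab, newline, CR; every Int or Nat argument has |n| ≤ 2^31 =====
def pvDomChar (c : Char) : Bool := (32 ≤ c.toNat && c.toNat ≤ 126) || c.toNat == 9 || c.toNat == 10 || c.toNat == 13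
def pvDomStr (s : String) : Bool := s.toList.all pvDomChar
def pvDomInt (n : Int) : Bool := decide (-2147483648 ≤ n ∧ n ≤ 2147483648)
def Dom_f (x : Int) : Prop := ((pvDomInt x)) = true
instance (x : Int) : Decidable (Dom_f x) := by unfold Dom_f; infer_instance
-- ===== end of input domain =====

-- B replaces A's memoised top-down recursion by a bottom-up two-accumulator bit loop (fusc);
-- return-value equivalence on x ≥ 0 (A mutates the module-level memo dict; B does not).

-- ===== PORT A =====
-- Literal port of A's recursion (the memo dict only caches values, it never changes them).
-- Fuel makes the recursion structural; fuel = x.toNat + 1 suffices for every x ≥ 0, so it is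
-- never exhausted there. On negative x Python A recurses forever (RecursionError), which
-- Pre_f excludes; exact for x ≥ 0.
def fGo : Nat → Int → Int
  | 0, _ => 0
  | fuel + 1, x =>
    if x = 0 then 1
    else if PySem.Int.mod x 2 = 1 then fGo fuel (PySem.Int.floordiv x 2)
    else fGo fuel (PySem.Int.floordiv x 2) + fGo fuel (PySem.Int.floordiv x 2 - 1)

def f (x : Int) : Int := fGo (x.toNat + 1) x

-- ===== PORT B =====
-- the while-loop of Source B as fuel recursion on state (n, a, b), consuming n's bits LSB-first;
-- fuel = n.toNat + 1 is never exhausted (n shrinks by half each step)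
def fAltGo : Nat → Int → Int → Int → Int
  | 0, _, _, b => b
  | fuel + 1, n, a, b =>
    if n > 0 then
      if PySem.Int.mod n 2 = 1 then fAltGo fuel (PySem.Int.floordiv n 2) a (a + b)
      else fAltGo fuel (PySem.Int.floordiv n 2) (a + b) b
    else b

def f_alt (x : Int) : Int := fAltGo ((x + 1).toNat + 1) (x + 1) 1 0

-- ===== PRECONDITION & SPEC =====
-- Pre_f excludes exactly the negative inputs, on which Python A recurses forever
-- (x // 2 never reaches 0) and dies with RecursionError.
def Pre_f (x : Int) : Prop := 0 ≤ x
instance (x : Int) : Decidable (Pre_f x) := by unfold Pre_f; infer_instance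
def pvWitness_f : Int := 11

def Spec_f (x : Int) (out : Int) : Prop := out = f_alt x
instance (x : Int) (out : Int) : Decidable (Spec_f x out) := by unfold Spec_f; infer_instance

-- ===== CLAIM (what is proved, stated in full; the proofs are below) =====
def Claim_equal_f : Prop := ∀ (x : Int), Dom_f x → Pre_f x → Spec_f x (f x)

-- ===== LEMMAS AND PROOFS =====

-- Stern's diatomic sequence (proof-only helper)
def fusc (n : Nat) : Int :=
  if n = 0 then 0
  else if n = 1 then 1
  else if n % 2 = 0 then fusc (n / 2)
  else fusc (n / 2) + fusc (n / 2 + 1)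
termination_by n
decreasing_by all_goals omega

theorem fusc_zero : fusc 0 = 0 := by rw [fusc]; norm_num
theorem fusc_one : fusc 1 = 1 := by rw [fusc]; norm_num

theorem fusc_even (m : Nat) (hm : 1 ≤ m) : fusc (2 * m) = fusc m := by
  rw [fusc]
  have h0 : ¬ (2 * m = 0) := by omega
  have h1 : ¬ (2 * m = 1) := by omega
  have h2 : (2 * m) % 2 = 0 := by omega
  have h3 : (2 * m) / 2 = m := by omega
  simp [h0, h1, h2, h3]

theorem fusc_odd (m : Nat) : fusc (2 * m + 1) = fusc m + fusc (m + 1) := by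
  by_cases hm : m = 0
  · subst hm; rw [fusc_zero, fusc_one]; norm_num [fusc_one]
  · rw [fusc]
    have h2 : ¬ ((2 * m + 1) % 2 = 0) := by omega
    have h3 : (2 * m + 1) / 2 = m := by omega
    simp [h3, hm]

theorem fGo_eq (fuel : Nat) : ∀ n : Nat, n < fuel → fGo fuel (↑n) = fusc (n + 1) := by
  induction fuel with
  | zero => intro n h; omega
  | succ fuel ih =>
    intro n hn
    rw [fGo]
    by_cases h0 : n = 0
    · subst h0; norm_num [fusc_one]
    · have hn0 : ¬ ((n : Int) = 0) := by exact_mod_cast h0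
      by_cases hodd : n % 2 = 1
      · obtain ⟨m, rfl⟩ : ∃ m, n = 2 * m + 1 := ⟨n / 2, by omega⟩
        have hm : PySem.Int.mod (↑(2 * m + 1)) 2 = 1 := by
          rw [PySem.Int.mod_eq_emod_of_pos (by norm_num : (0:Int) < 2)]; omega
        have hdiv : PySem.Int.floordiv (↑(2 * m + 1)) 2 = (↑m : Int) := by
          rw [PySem.Int.floordiv_eq_ediv_of_pos (by norm_num : (0:Int) < 2)]; omega
        simp only [hn0, hm, hdiv, if_true, if_false]
        rw [ih m (by omega)]
        have h2 : 2 * m + 1 + 1 = 2 * (m + 1) := by ring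
        rw [h2, fusc_even (m + 1) (by omega)]
      · obtain ⟨m, rfl⟩ : ∃ m, n = 2 * m := ⟨n / 2, by omega⟩
        have hmge : 1 ≤ m := by omega
        have hm : ¬ (PySem.Int.mod (↑(2 * m)) 2 = 1) := by
          rw [PySem.Int.mod_eq_emod_of_pos (by norm_num : (0:Int) < 2)]; omega
        have hdiv : PySem.Int.floordiv (↑(2 * m)) 2 = (↑m : Int) := by
          rw [PySem.Int.floordiv_eq_ediv_of_pos (by norm_num : (0:Int) < 2)]; omega
        simp only [hn0, hm, hdiv, if_false]
        have hsub : (↑m : Int) - 1 = (↑(m - 1) : Int) := by push_cast [hmge]; ring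
        rw [hsub, ih m (by omega), ih (m - 1) (by omega)]
        have h1 : m - 1 + 1 = m := by omega
        rw [h1, fusc_odd m]
        ring

theorem fAltGo_eq (fuel : Nat) :
    ∀ (n : Nat) (a b : Int), n < fuel → fAltGo fuel (↑n) a b = a * fusc n + b * fusc (n + 1) := by
  induction fuel with
  | zero => intro n a b h; omega
  | succ fuel ih =>
    intro n a b hn
    rw [fAltGo]
    by_cases h0 : n = 0
    · subst h0; norm_num [fusc_zero, fusc_one]
    · have hpos : (↑n : Int) > 0 := by omega
      by_cases hodd : n % 2 = 1
      · obtain ⟨m, rfl⟩ : ∃ m, n = 2 * m + 1 := ⟨n / 2, by omega⟩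
        have hm : PySem.Int.mod (↑(2 * m + 1)) 2 = 1 := by
          rw [PySem.Int.mod_eq_emod_of_pos (by norm_num : (0:Int) < 2)]; omega
        have hdiv : PySem.Int.floordiv (↑(2 * m + 1)) 2 = (↑m : Int) := by
          rw [PySem.Int.floordiv_eq_ediv_of_pos (by norm_num : (0:Int) < 2)]; omega
        simp only [hpos, hm, hdiv, if_true]
        rw [ih m a (a + b) (by omega)]
        have h2 : 2 * m + 1 + 1 = 2 * (m + 1) := by ring
        rw [h2, fusc_even (m + 1) (by omega), fusc_odd m]
        ring
      · obtain ⟨m, rfl⟩ : ∃ m, n = 2 * m := ⟨n / 2, by omega⟩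
        have hmge : 1 ≤ m := by omega
        have hm : ¬ (PySem.Int.mod (↑(2 * m)) 2 = 1) := by
          rw [PySem.Int.mod_eq_emod_of_pos (by norm_num : (0:Int) < 2)]; omega
        have hdiv : PySem.Int.floordiv (↑(2 * m)) 2 = (↑m : Int) := by
          rw [PySem.Int.floordiv_eq_ediv_of_pos (by norm_num : (0:Int) < 2)]; omega
        simp only [hpos, hm, hdiv, if_true, if_false]
        rw [ih m (a + b) b (by omega)]
        rw [fusc_even m hmge, fusc_odd m]
        ring

-- ===== VERDICT (by name: the statement is the Claim_ definition above) =====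
theorem f_spec : Claim_equal_f := by
  intro x _ hx
  unfold Spec_f f f_alt
  obtain ⟨n, rfl⟩ : ∃ n : Nat, x = ↑n := ⟨x.toNat, (Int.toNat_of_nonneg hx).symm⟩
  have ht : (↑n : Int).toNat = n := Int.toNat_natCast n
  have ht1 : ((↑n : Int) + 1).toNat = n + 1 := by omega
  have hc : (↑n : Int) + 1 = ((n + 1 : Nat) : Int) := by push_cast; ring
  rw [ht, ht1, hc, fGo_eq (n + 1) n (by omega), fAltGo_eq (n + 2) (n + 1) 1 0 (by omega)]
  ring
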